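-- pv_equiv track=rewrite | github.com/rhoitjadhav/competitive-programming-practice | codeforces/archive/1512B.Almost Rectangle.py | solve
-- ===== SOURCE A (Python) =====
-- def solve(n, matrix):
--     stars = []
--
--     for i in range(n):
--         for j in range(n):
--             if matrix[i][j] == "*":
--                 stars.append([i, j])
--
--     star1, star2 = stars[0], stars[1]
--     newstar1 = [-1, -1]
--     newstar2 = [-1, -1]
--
--     # Rows
--     if star1[0] == star2[0]:
--         if star1[0] == 0:
--             newstar1[0] = star1[0] + 1
--             newstar2[0] = star2[0] + 1
--
--         else:
--             newstar1[0] = star1[0] - 1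
--             newstar2[0] = star2[0] - 1
--
--         newstar1[1] = star1[1]
--         newstar2[1] = star2[1]
--
--     # Columns
--     elif star1[1] == star2[1]:
--         if star1[1] == 0:
--             newstar1[1] = star1[1] + 1
--             newstar2[1] = star2[1] + 1
--
--         else:
--             newstar1[1] = star1[1] - 1
--             newstar2[1] = star2[1] - 1
--
--         newstar1[0] = star1[0]
--         newstar2[0] = star2[0]
--
--     # Random
--     else:
--         newstar1[1] = star2[1]
--         newstar2[1] = star1[1]
--
--         newstar1[0] = star1[0]
--         newstar2[0] = star2[0]
--
--     matrix[newstar1[0]][newstar1[1]] = "*"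
--     matrix[newstar2[0]][newstar2[1]] = "*"
--
--     return matrix
-- ===== SOURCE B (Python) =====
-- def solve(n, matrix):
--     # Single flattened scan: take the first two stars lazily (row-major via divmod),
--     # derive the target row-set and column-set, then rebuild every row functionally
--     # from a membership predicate (no in-place point writes; the return value matches A,
--     # but unlike A this B does not mutate `matrix`).
--     stars = (divmod(k, n) for k in range(n * n) if matrix[k // n][k % n] == "*")
--     r1, c1 = next(stars)
--     r2, c2 = next(stars)
--     rows = {r1, r2} if r1 != r2 else {r1, r1 + 1 if r1 == 0 else r1 - 1}
--     cols = {c1, c2} if c1 != c2 else {c1, c1 + 1 if c1 == 0 else c1 - 1}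
--     return [["*" if (i in rows and j in cols) or ch == "*" else ch
--              for j, ch in enumerate(row)]
--             for i, row in enumerate(matrix)]
-- ===== Notes on version B (the rewrite author's own statement) =====
-- stated objective: alternative
-- what changed: B replaces A's nested full-grid scan plus three-branch mutation of two computed cells by a single lazily-stopped flattened divmod scan for the first two stars and a functional rebuild of the whole matrix from a row-set/column-set membership predicate (no in-place writes).
import Mathlib
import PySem

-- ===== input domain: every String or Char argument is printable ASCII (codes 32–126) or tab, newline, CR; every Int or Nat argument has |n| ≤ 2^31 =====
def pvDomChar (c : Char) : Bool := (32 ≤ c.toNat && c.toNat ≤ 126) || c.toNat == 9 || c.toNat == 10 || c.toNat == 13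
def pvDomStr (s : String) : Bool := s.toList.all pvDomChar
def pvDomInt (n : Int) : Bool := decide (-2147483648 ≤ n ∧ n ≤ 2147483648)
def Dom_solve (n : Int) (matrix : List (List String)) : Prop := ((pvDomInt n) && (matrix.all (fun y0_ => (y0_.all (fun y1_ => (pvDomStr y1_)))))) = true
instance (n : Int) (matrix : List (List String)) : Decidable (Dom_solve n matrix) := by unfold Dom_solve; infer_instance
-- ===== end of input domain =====

-- B finds the first two stars by a single flattened divmod scan that stops early, and rebuilds the
-- whole matrix from a row-set/column-set membership predicate instead of A's three-branch case
-- analysis and two point writes; equal return values are proved (the Python A mutates `matrix`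
-- in place while the Python B returns a fresh matrix — the side effect differs).

-- ===== PORT A =====
-- `matrix[i][j]` read / `matrix[i][j] = "*"` write (indices are nonnegative and in range on
-- every admitted input, where these are exact)
def getCellA (m : List (List String)) (i j : Int) : String :=
  (PySem.List.pyGet? ((PySem.List.pyGet? m i).getD []) j).getD ""

def setCellA (m : List (List String)) (i j : Int) : List (List String) :=
  m.set i.toNat ((m[i.toNat]?.getD []).set j.toNat "*")

-- inner `for j in range(n): if matrix[i][j] == "*": stars.append([i, j])`
def rowStarsA (m : List (List String)) (i : Int) (js : List Int) : List (Int × Int) :=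
  match js with
  | [] => []
  | j :: rest =>
    if getCellA m i j = "*" then (i, j) :: rowStarsA m i rest else rowStarsA m i rest

-- outer `for i in range(n)`
def gridStarsA (m : List (List String)) (n : Int) (is : List Int) : List (Int × Int) :=
  match is with
  | [] => []
  | i :: rest => rowStarsA m i (PySem.List.pyRange 0 n 1) ++ gridStarsA m n rest

def solve (n : Int) (matrix : List (List String)) : List (List String) :=
  let stars := gridStarsA matrix n (PySem.List.pyRange 0 n 1)
  match stars with
  | (a1, a2) :: (b1, b2) :: _ =>
    -- the if/elif/else computing newstar1, newstar2
    let ns : (Int × Int) × (Int × Int) :=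
      if a1 = b1 then
        if a1 = 0 then ((a1 + 1, a2), (b1 + 1, b2)) else ((a1 - 1, a2), (b1 - 1, b2))
      else if a2 = b2 then
        if a2 = 0 then ((a1, a2 + 1), (b1, b2 + 1)) else ((a1, a2 - 1), (b1, b2 - 1))
      else ((a1, b2), (b1, a2))
    setCellA (setCellA matrix ns.1.1 ns.1.2) ns.2.1 ns.2.2
  | _ => matrix   -- Python raises IndexError here (fewer than two stars); excluded by Pre_solve

-- ===== PORT B =====
-- B's own `matrix[k // n][k % n]` read (same Python primitive, transcribed for B)
def getCellB (m : List (List String)) (i j : Int) : String :=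
  (PySem.List.pyGet? ((PySem.List.pyGet? m i).getD []) j).getD ""

-- one `next(stars)` on the generator `(divmod(k, n) for k in range(n*n) if matrix[k//n][k%n] == "*")`:
-- advances through the remaining k's until a star is found, returning it with the rest of the range
def nextStarB (m : List (List String)) (n : Int) : List Int → Option ((Int × Int) × List Int)
  | [] => none
  | k :: rest =>
    if getCellB m (PySem.Int.floordiv k n) (PySem.Int.mod k n) = "*" then
      some ((PySem.Int.floordiv k n, PySem.Int.mod k n), rest)
    else nextStarB m n rest

-- the comprehension's cell value: `"*" if (i in rows and j in cols) or ch == "*" else ch`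
def markCellB (rows cols : PySem.Set Int) (i j : Int) (ch : String) : String :=
  if (PySem.Set.contains rows i && PySem.Set.contains cols j) || ch == "*" then "*" else ch

def solve_alt (n : Int) (matrix : List (List String)) : List (List String) :=
  match nextStarB matrix n (PySem.List.pyRange 0 (n * n) 1) with
  | none => matrix          -- `next(stars)` raises StopIteration; excluded by Pre_solve
  | some ((r1, c1), ks) =>
    match nextStarB matrix n ks with
    | none => matrix        -- second `next(stars)` raises StopIteration; excluded by Pre_solve
    | some ((r2, c2), _) =>
      let rows : PySem.Set Int :=
        if r1 ≠ r2 then PySem.Set.ofList [r1, r2]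
        else PySem.Set.ofList [r1, if r1 = 0 then r1 + 1 else r1 - 1]
      let cols : PySem.Set Int :=
        if c1 ≠ c2 then PySem.Set.ofList [c1, c2]
        else PySem.Set.ofList [c1, if c1 = 0 then c1 + 1 else c1 - 1]
      (PySem.List.enumerate matrix).map (fun ir =>
        (PySem.List.enumerate ir.2).map (fun jc => markCellB rows cols ir.1 jc.1 jc.2))

-- ===== PRECONDITION & SPEC =====
-- Pre_solve is exactly where the Python A returns: the scanned n x n region exists
-- (else matrix[i][j] raises IndexError) and holds at least two stars (else stars[1] raises).
def Pre_solve (n : Int) (matrix : List (List String)) : Prop :=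
  n.toNat ≤ matrix.length ∧
  (∀ row ∈ matrix.take n.toNat, n.toNat ≤ row.length) ∧
  2 ≤ ((matrix.take n.toNat).map (fun row => (row.take n.toNat).count "*")).sum

instance (n : Int) (matrix : List (List String)) : Decidable (Pre_solve n matrix) := by
  unfold Pre_solve; infer_instance

def pvWitness_solve : Int × List (List String) := (2, [[".", "*"], ["*", "."]])

def Spec_solve (n : Int) (matrix : List (List String)) (out : List (List String)) : Prop := out = solve_alt n matrix
instance (n : Int) (matrix : List (List String)) (out : List (List String)) : Decidable (Spec_solve n matrix out) := by unfold Spec_solve; infer_instance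

-- ===== CLAIM (what is proved, stated in full; the proofs are below) =====
def Claim_equal_solve : Prop := ∀ (n : Int) (matrix : List (List String)), Dom_solve n matrix → Pre_solve n matrix → Spec_solve n matrix (solve n matrix)

-- ===== LEMMAS AND PROOFS =====

theorem getCellA_eq : getCellA = getCellB := rfl

-- proof-side cell accessor with Nat indices
def cellN (m : List (List String)) (i j : Nat) : String := ((m[i]?.getD [])[j]?.getD "")

-- the full star stream of B's generator over a remaining list of k's
def starsOfB (m : List (List String)) (n : Int) (ks : List Int) : List (Int × Int) :=
  ks.filterMap (fun k =>
    if getCellB m (PySem.Int.floordiv k n) (PySem.Int.mod k n) = "*"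
    then some (PySem.Int.floordiv k n, PySem.Int.mod k n) else none)

theorem rowStarsA_eq (m : List (List String)) (i : Int) (js : List Int) :
    rowStarsA m i js = (js.filter (fun j => getCellB m i j == "*")).map (fun j => (i, j)) := by
  induction js with
  | nil => rfl
  | cons j rest ih =>
    by_cases h : getCellB m i j = "*" <;> simp [rowStarsA, getCellA_eq, h, ih]

theorem rowStarsA_filterMap (m : List (List String)) (i : Int) (js : List Int) :
    rowStarsA m i js
      = js.filterMap (fun j => if getCellB m i j = "*" then some (i, j) else none) := by
  induction js with
  | nil => rfl
  | cons j rest ih =>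
    by_cases h : getCellB m i j = "*" <;>
      simp [rowStarsA, getCellA_eq, h, ih]

theorem gridStarsA_eq (m : List (List String)) (n : Int) (is : List Int) :
    gridStarsA m n is = is.flatMap (fun i => rowStarsA m i (PySem.List.pyRange 0 n 1)) := by
  induction is with
  | nil => rfl
  | cons i rest ih => simp [gridStarsA, ih]

theorem mem_gridStarsA {m : List (List String)} {n : Int} {is : List Int} {p : Int × Int}
    (hp : p ∈ gridStarsA m n is) :
    p.1 ∈ is ∧ p.2 ∈ PySem.List.pyRange 0 n 1 ∧ getCellB m p.1 p.2 = "*" := by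
  rw [gridStarsA_eq] at hp
  obtain ⟨i, hi, hpi⟩ := List.mem_flatMap.1 hp
  rw [rowStarsA_eq] at hpi
  obtain ⟨j, hj, rfl⟩ := List.mem_map.1 hpi
  obtain ⟨hjm, hjs⟩ := List.mem_filter.1 hj
  exact ⟨hi, hjm, by simpa using hjs⟩

theorem nodup_gridStarsA (m : List (List String)) (n : Int) (is : List Int) (his : is.Nodup) :
    (gridStarsA m n is).Nodup := by
  rw [gridStarsA_eq, List.nodup_flatMap]
  refine ⟨fun i _ => ?_, ?_⟩
  · rw [rowStarsA_eq]
    exact ((PySem.List.nodup_pyRange_one 0 n).filter _).map (fun a b h => by simpa using h)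
  · refine his.imp ?_
    intro a b hab p hpa hpb
    simp only [rowStarsA_eq, List.mem_map, List.mem_filter] at hpa hpb
    obtain ⟨ja, _, rfl⟩ := hpa
    obtain ⟨jb, _, hb⟩ := hpb
    exact hab (Eq.symm (by simpa using congrArg Prod.fst hb))

-- counting: the star list of A's full scan has exactly as many entries as the region holds stars
theorem countP_range_take (row : List String) :
    ∀ k : Nat, k ≤ row.length →
      (List.range k).countP (fun j => row[j]?.getD "" == "*") = (row.take k).count "*" := by
  intro k
  induction k with
  | zero => intro _; simp
  | succ k ihk =>
    intro hk
    rw [List.range_succ, List.countP_append, List.take_add_one, List.count_append,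
        ihk (by omega)]
    have hg : row[k]? = some row[k] := List.getElem?_eq_getElem (by omega)
    by_cases h : row[k] = "*" <;> simp [hg, h]

theorem length_rowStarsA (m : List (List String)) (n : Int) (i : Nat) (row : List String)
    (hrow : m[i]? = some row) (hlen : n.toNat ≤ row.length) :
    (rowStarsA m (i : Int) (PySem.List.pyRange 0 n 1)).length = (row.take n.toNat).count "*" := by
  rw [rowStarsA_eq, List.length_map, ← List.countP_eq_length_filter,
      PySem.List.pyRange_zero, List.countP_map, ← countP_range_take row n.toNat hlen]
  refine List.countP_congr fun j _ => ?_
  simp [getCellB, PySem.List.pyGet?_natCast, hrow, Function.comp]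

theorem gridStarsA_append (m : List (List String)) (n : Int) (is1 is2 : List Int) :
    gridStarsA m n (is1 ++ is2) = gridStarsA m n is1 ++ gridStarsA m n is2 := by
  simp [gridStarsA_eq]

theorem length_gridStarsA (m : List (List String)) (n : Int) :
    ∀ k : Nat, k ≤ m.length → (∀ row ∈ m.take k, n.toNat ≤ row.length) →
      (gridStarsA m n (PySem.List.pyRange 0 (k : Int) 1)).length
        = ((m.take k).map (fun row => (row.take n.toNat).count "*")).sum := by
  intro k
  induction k with
  | zero => intro _ _; simp [gridStarsA, PySem.List.pyRange_one_eq_nil]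
  | succ k ihk =>
    intro hk hr
    have hg : m[k]? = some m[k] := List.getElem?_eq_getElem (by omega)
    have hmem : m[k] ∈ m.take (k + 1) := by
      rw [List.take_add_one, hg]
      exact List.mem_append_right _ (by simp)
    rw [show ((k + 1 : Nat) : Int) = (k : Int) + 1 by push_cast; ring,
        PySem.List.pyRange_one_succ_right (by positivity), gridStarsA_append, List.length_append,
        ihk (by omega) (fun r hrm => hr r (by
          rw [List.take_add_one]; exact List.mem_append_left _ hrm)),
        List.take_add_one, hg, List.map_append, List.sum_append]
    simp [gridStarsA, length_rowStarsA m n k m[k] hg (hr _ hmem)]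

-- advancing the generator: if the star stream of the remaining k's is p :: t, `next` yields p
-- and leaves a remainder whose star stream is t
theorem nextStarB_cons (m : List (List String)) (n : Int) :
    ∀ (ks : List Int) (p : Int × Int) (t : List (Int × Int)), starsOfB m n ks = p :: t →
      ∃ rest, nextStarB m n ks = some (p, rest) ∧ starsOfB m n rest = t := by
  intro ks
  induction ks with
  | nil => intro p t h; simp [starsOfB] at h
  | cons k rest ih =>
    intro p t h
    by_cases hs : getCellB m (PySem.Int.floordiv k n) (PySem.Int.mod k n) = "*"
    · rw [starsOfB, List.filterMap_cons, if_pos hs] at h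
      obtain ⟨h1, h2⟩ := List.cons.injEq .. ▸ h
      exact ⟨rest, by simp [nextStarB, hs, h1], h2⟩
    · rw [starsOfB, List.filterMap_cons, if_neg hs] at h
      obtain ⟨r, hr1, hr2⟩ := ih p t h
      exact ⟨r, by simp [nextStarB, hs, hr1], hr2⟩

-- the flattened range as the nested one
theorem range_mul_flatMap (m : Nat) :
    ∀ a : Nat, List.range (a * m)
      = (List.range a).flatMap (fun i => (List.range m).map (fun j => i * m + j)) := by
  intro a
  induction a with
  | zero => simp
  | succ a ih =>
    rw [Nat.succ_mul, List.range_add, List.range_succ, List.flatMap_append, ih]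
    simp

theorem pyRange_sq (n : Int) (hn : 0 ≤ n) :
    PySem.List.pyRange 0 (n * n) 1
      = (PySem.List.pyRange 0 n 1).flatMap
          (fun i => (PySem.List.pyRange 0 n 1).map (fun j => i * n + j)) := by
  obtain ⟨m, rfl⟩ : ∃ m : Nat, n = (m : Int) := ⟨n.toNat, (Int.toNat_of_nonneg hn).symm⟩
  rw [show ((m : Int) * m) = ((m * m : Nat) : Int) by push_cast; ring,
      PySem.List.pyRange_zero, PySem.List.pyRange_zero]
  rw [Int.toNat_natCast, Int.toNat_natCast, range_mul_flatMap m m, List.map_flatMap,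
      List.flatMap_map]
  refine List.flatMap_congr ?_
  intro i _
  rw [List.map_map, List.map_map]
  refine List.map_congr_left ?_
  intro j _
  simp only [Function.comp]
  push_cast
  ring

-- B's star stream over the flattened range is exactly A's star list
theorem starsOfB_flat (m : List (List String)) (n : Int) (hn : 0 ≤ n) :
    starsOfB m n (PySem.List.pyRange 0 (n * n) 1)
      = gridStarsA m n (PySem.List.pyRange 0 n 1) := by
  rw [pyRange_sq n hn, gridStarsA_eq, starsOfB, List.filterMap_flatMap]
  refine List.flatMap_congr ?_
  intro i hi
  obtain ⟨hi0, hin⟩ := PySem.List.mem_pyRange_one.1 hi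
  rw [List.filterMap_map, rowStarsA_filterMap]
  refine List.filterMap_congr ?_
  intro j hj
  obtain ⟨hj0, hjn⟩ := PySem.List.mem_pyRange_one.1 hj
  have hnpos : 0 < n := lt_of_le_of_lt hj0 hjn
  have hfd : PySem.Int.floordiv (i * n + j) n = i := by
    rw [PySem.Int.floordiv_eq_iff_of_pos hnpos]
    have h2 : (i + 1) * n = i * n + n := by ring
    constructor
    · linarith
    · linarith
  have hmd : PySem.Int.mod (i * n + j) n = j := by
    have := PySem.Int.floordiv_mul_add_mod (i * n + j) n
    rw [hfd] at this
    linarith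
  simp [Function.comp, hfd, hmd]

-- getElem? of enumerate
theorem enum_getElem? {α : Type} (xs : List α) (s : Int) (k : Nat) :
    (PySem.List.enumerate xs s)[k]? = xs[k]?.map (fun x => (s + (k : Int), x)) := by
  induction xs generalizing s k with
  | nil => simp [PySem.List.enumerate]
  | cons x xs ih =>
    cases k with
    | zero => simp [PySem.List.enumerate_cons]
    | succ k =>
      have hc : s + 1 + (k : Int) = s + ((k + 1 : Nat) : Int) := by push_cast; ring
      simp [PySem.List.enumerate_cons, ih, hc]

-- shape of A's point write
theorem setCellA_length (m : List (List String)) (p q : Int) :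
    (setCellA m p q).length = m.length := by
  simp [setCellA]

theorem setCellA_rowlen (m : List (List String)) (p q : Int) (i : Nat) :
    ((setCellA m p q)[i]?.getD []).length = (m[i]?.getD []).length := by
  unfold setCellA
  rw [List.getElem?_set]
  by_cases hip : p.toNat = i
  · subst hip
    by_cases h : p.toNat < m.length
    · rw [if_pos rfl, if_pos h, List.getElem?_eq_getElem h]
      simp
    · rw [if_pos rfl, if_neg h, List.getElem?_eq_none (by omega)]
  · rw [if_neg hip]

theorem setCellA_cell (m : List (List String)) (p q : Int)
    (hpl : p.toNat < m.length) (hql : q.toNat < (m[p.toNat]?.getD []).length) (i j : Nat) :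
    cellN (setCellA m p q) i j
      = if i = p.toNat ∧ j = q.toNat then "*" else cellN m i j := by
  unfold cellN setCellA
  rw [List.getElem?_set]
  by_cases hip : p.toNat = i
  · subst hip
    rw [if_pos rfl, if_pos hpl, Option.getD_some, List.getElem?_set]
    by_cases hjq : q.toNat = j
    · subst hjq
      rw [if_pos rfl, if_pos hql, if_pos ⟨rfl, rfl⟩]
      rfl
    · rw [if_neg hjq, if_neg (by omega)]
  · rw [if_neg hip, if_neg (by omega)]

theorem getCellB_cellN (m : List (List String)) (i j : Int) (hi : 0 ≤ i) (hj : 0 ≤ j) :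
    getCellB m i j = cellN m i.toNat j.toNat := by
  unfold getCellB cellN
  rw [PySem.List.pyGet?_of_nonneg _ hi, PySem.List.pyGet?_of_nonneg _ hj]

-- the heart of the equivalence: A's two point writes equal B's predicate rebuild whenever the
-- written cells lie in R x C, are in range, and every other cell of R x C already holds "*"
theorem rebuild_eq (matrix : List (List String)) (R C : PySem.Set Int) (p1 q1 p2 q2 : Int)
    (hp1 : 0 ≤ p1) (hq1 : 0 ≤ q1) (hp2 : 0 ≤ p2) (hq2 : 0 ≤ q2)
    (hp1l : p1.toNat < matrix.length) (hq1l : q1.toNat < (matrix[p1.toNat]?.getD []).length)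
    (hp2l : p2.toNat < matrix.length) (hq2l : q2.toNat < (matrix[p2.toNat]?.getD []).length)
    (hm1 : PySem.Set.contains R p1 = true ∧ PySem.Set.contains C q1 = true)
    (hm2 : PySem.Set.contains R p2 = true ∧ PySem.Set.contains C q2 = true)
    (hstar : ∀ u v : Int, PySem.Set.contains R u = true → PySem.Set.contains C v = true →
      (u = p1 ∧ v = q1) ∨ (u = p2 ∧ v = q2) ∨
        (0 ≤ u ∧ 0 ≤ v ∧ cellN matrix u.toNat v.toNat = "*")) :
    setCellA (setCellA matrix p1 q1) p2 q2
      = (PySem.List.enumerate matrix).map (fun ir =>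
          (PySem.List.enumerate ir.2).map (fun jc => markCellB R C ir.1 jc.1 jc.2)) := by
  have hp2l' : p2.toNat < (setCellA matrix p1 q1).length := by
    rw [setCellA_length]; exact hp2l
  have hq2l' : q2.toNat < ((setCellA matrix p1 q1)[p2.toNat]?.getD []).length := by
    rw [setCellA_rowlen]; exact hq2l
  apply List.ext_getElem?
  intro i
  rcases hmi : matrix[i]? with _ | row
  · have hil : matrix.length ≤ i := by
      by_contra h
      push Not at h
      rw [List.getElem?_eq_getElem h] at hmi
      exact absurd hmi (by simp)
    rw [List.getElem?_eq_none (by rw [setCellA_length, setCellA_length]; omega),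
        List.getElem?_eq_none (by rw [List.length_map, PySem.List.length_enumerate]; omega)]
  · have hil : i < matrix.length := by
      by_contra h
      push Not at h
      rw [List.getElem?_eq_none h] at hmi
      exact absurd hmi (by simp)
    have hLl : i < (setCellA (setCellA matrix p1 q1) p2 q2).length := by
      rw [setCellA_length, setCellA_length]; exact hil
    rw [List.getElem?_map, enum_getElem?, hmi, Option.map_some, Option.map_some,
        List.getElem?_eq_getElem hLl]
    refine congrArg some ?_
    have hrowD : matrix[i]?.getD [] = row := by rw [hmi]; rfl
    have hgetrow : (setCellA (setCellA matrix p1 q1) p2 q2)[i]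
        = ((setCellA (setCellA matrix p1 q1) p2 q2)[i]?.getD []) := by
      rw [List.getElem?_eq_getElem hLl]; rfl
    apply List.ext_getElem
    · rw [hgetrow, setCellA_rowlen, setCellA_rowlen, hrowD, List.length_map,
          PySem.List.length_enumerate]
    · intro j hj1 hj2
      have hjr : j < row.length := by
        rw [List.length_map, PySem.List.length_enumerate] at hj2
        exact hj2
      -- right-hand cell
      have hej : (PySem.List.enumerate row)[j]? = some ((0 : Int) + (j : Int), row[j]) := by
        rw [enum_getElem?, List.getElem?_eq_getElem hjr]
        rfl
      have hej' : (PySem.List.enumerate row)[j]'(by rwa [PySem.List.length_enumerate])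
          = ((0 : Int) + (j : Int), row[j]) := by
        apply Option.some.inj
        rw [← List.getElem?_eq_getElem]
        exact hej
      rw [List.getElem_map, hej']
      -- left-hand cell
      have hcl : (setCellA (setCellA matrix p1 q1) p2 q2)[i][j]
          = cellN (setCellA (setCellA matrix p1 q1) p2 q2) i j := by
        unfold cellN
        rw [List.getElem?_eq_getElem hLl, Option.getD_some, List.getElem?_eq_getElem hj1,
            Option.getD_some]
      have hcm : cellN matrix i j = row[j] := by
        unfold cellN
        rw [hmi, Option.getD_some, List.getElem?_eq_getElem hjr, Option.getD_some]
      rw [hcl, setCellA_cell _ _ _ hp2l' hq2l', setCellA_cell _ _ _ hp1l hq1l, hcm]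
      simp only [zero_add, markCellB]
      by_cases hc2 : i = p2.toNat ∧ j = q2.toNat
      · have hiu : (i : Int) = p2 := by omega
        have hju : (j : Int) = q2 := by omega
        rw [if_pos hc2, hiu, hju, hm2.1, hm2.2]
        simp
      · by_cases hc1 : i = p1.toNat ∧ j = q1.toNat
        · have hiu : (i : Int) = p1 := by omega
          have hju : (j : Int) = q1 := by omega
          rw [if_neg hc2, if_pos hc1, hiu, hju, hm1.1, hm1.2]
          simp
        · rw [if_neg hc2, if_neg hc1]
          by_cases hch : row[j] = "*"
          · simp [hch]
          · have hcontra : ¬ (PySem.Set.contains R (i : Int) = true ∧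
                PySem.Set.contains C (j : Int) = true) := by
              rintro ⟨hcr, hcc⟩
              rcases hstar _ _ hcr hcc with ⟨h1, h2⟩ | ⟨h1, h2⟩ | ⟨_, _, h3⟩
              · refine absurd ⟨?_, ?_⟩ hc1 <;> omega
              · refine absurd ⟨?_, ?_⟩ hc2 <;> omega
              · rw [Int.toNat_natCast, Int.toNat_natCast, hcm] at h3
                exact hch h3
            have hfalse : (PySem.Set.contains R (i : Int)
                && PySem.Set.contains C (j : Int)) = false := by
              cases hcr : PySem.Set.contains R (i : Int)
              · simp
              · cases hcc : PySem.Set.contains C (j : Int)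
                · simp
                · exact absurd ⟨hcr, hcc⟩ hcontra
            rw [hfalse]
            simp [hch]

-- two-element set membership, both directions
theorem contains_pair (x y : Int) :
    PySem.Set.contains (PySem.Set.ofList [x, y]) x = true ∧
      PySem.Set.contains (PySem.Set.ofList [x, y]) y = true := by
  constructor <;> rw [PySem.Set.contains_iff, PySem.Set.mem_ofList] <;> simp

theorem contains_pair_inv (x y u : Int)
    (h : PySem.Set.contains (PySem.Set.ofList [x, y]) u = true) : u = x ∨ u = y := by
  rw [PySem.Set.contains_iff, PySem.Set.mem_ofList] at h
  simpa using h

-- ===== VERDICT (by name: the statement is the Claim_ definition above) =====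
theorem solve_spec : Claim_equal_solve := by
  intro n matrix _ hpre
  unfold Spec_solve
  obtain ⟨hm, hrows, hcount⟩ := hpre
  have hn0 : 0 ≤ n := by
    by_contra hneg
    rw [show n.toNat = 0 by omega] at hcount
    simp at hcount
  have hn2 : 2 ≤ n.toNat := by
    by_contra h
    push Not at h
    have hb : ∀ x ∈ (matrix.take n.toNat).map (fun row => (row.take n.toNat).count "*"),
        x ≤ 1 := by
      intro x hx
      obtain ⟨row, _, rfl⟩ := List.mem_map.1 hx
      have h1 : (row.take n.toNat).count "*" ≤ (row.take n.toNat).length :=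
        List.count_le_length
      have h2 : (row.take n.toNat).length ≤ n.toNat := List.length_take_le _ _
      omega
    have hl : ((matrix.take n.toNat).map
        (fun row => (row.take n.toNat).count "*")).length ≤ 1 := by
      rw [List.length_map]
      have := List.length_take_le n.toNat matrix
      omega
    have hsum := List.sum_le_card_nsmul _ 1 hb
    simp only [smul_eq_mul, mul_one] at hsum
    omega
  have hlen2 : 2 ≤ (gridStarsA matrix n (PySem.List.pyRange 0 n 1)).length := by
    have h := length_gridStarsA matrix n n.toNat hm hrows
    rw [Int.toNat_of_nonneg hn0] at h
    rw [h]
    exact hcount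
  have hnd : (gridStarsA matrix n (PySem.List.pyRange 0 n 1)).Nodup :=
    nodup_gridStarsA matrix n _ (PySem.List.nodup_pyRange_one 0 n)
  rcases hE : gridStarsA matrix n (PySem.List.pyRange 0 n 1) with
    _ | ⟨⟨a1, a2⟩, _ | ⟨⟨b1, b2⟩, rest⟩⟩
  · rw [hE] at hlen2; simp at hlen2
  · rw [hE] at hlen2; simp at hlen2
  have hne : (a1, a2) ≠ (b1, b2) := by
    rw [hE] at hnd
    exact fun h => (List.nodup_cons.1 hnd).1 (h ▸ List.mem_cons_self)
  obtain ⟨hmemA, hjA, hstarA⟩ := mem_gridStarsA (p := (a1, a2)) (hE ▸ List.mem_cons_self)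
  obtain ⟨hmemB, hjB, hstarB⟩ := mem_gridStarsA (p := (b1, b2))
      (hE ▸ List.mem_cons_of_mem _ List.mem_cons_self)
  have ha1 := PySem.List.mem_pyRange_one.1 hmemA
  have ha2 := PySem.List.mem_pyRange_one.1 hjA
  have hb1 := PySem.List.mem_pyRange_one.1 hmemB
  have hb2 := PySem.List.mem_pyRange_one.1 hjB
  have hrowlen : ∀ p : Nat, p < n.toNat → n.toNat ≤ (matrix[p]?.getD []).length := by
    intro p hp
    have hpl : p < matrix.length := lt_of_lt_of_le hp hm
    rw [List.getElem?_eq_getElem hpl, Option.getD_some]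
    have h1 : p < (matrix.take n.toNat).length := by
      rw [List.length_take]; omega
    have h2 : (matrix.take n.toNat)[p]'h1 ∈ matrix.take n.toNat := List.getElem_mem h1
    rw [List.getElem_take] at h2
    exact hrows _ h2
  have hbound : ∀ p q : Int, 0 ≤ p → p < n → 0 ≤ q → q < n →
      p.toNat < matrix.length ∧ q.toNat < (matrix[p.toNat]?.getD []).length := by
    intro p q hp0 hpn hq0 hqn
    have h1 : p.toNat < n.toNat := by omega
    have := hrowlen p.toNat h1
    exact ⟨by omega, by omega⟩
  have hA : cellN matrix a1.toNat a2.toNat = "*" := by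
    rw [← getCellB_cellN matrix a1 a2 ha1.1 ha2.1]
    exact hstarA
  have hB : cellN matrix b1.toNat b2.toNat = "*" := by
    rw [← getCellB_cellN matrix b1 b2 hb1.1 hb2.1]
    exact hstarB
  have hstarsB : starsOfB matrix n (PySem.List.pyRange 0 (n * n) 1)
      = (a1, a2) :: (b1, b2) :: rest := by
    rw [starsOfB_flat matrix n hn0, hE]
  obtain ⟨ks1, hks1, hks1s⟩ := nextStarB_cons matrix n _ _ _ hstarsB
  obtain ⟨ks2, hks2, _⟩ := nextStarB_cons matrix n _ _ _ hks1s
  unfold solve solve_alt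
  rw [hE]
  simp only [hks1, hks2]
  by_cases hr : a1 = b1
  · -- same row: a2 ≠ b2, twin row a1+1 (row 0) or a1-1
    subst hr
    have hcne : ¬ a2 = b2 := fun h => hne (by rw [h])
    simp only [ne_eq, not_true_eq_false, if_false, hcne, not_false_eq_true, if_true]
    by_cases h0 : a1 = 0
    · subst h0
      refine rebuild_eq matrix _ _ (0 + 1) a2 (0 + 1) b2 (by omega) ha2.1 (by omega) hb2.1
        (hbound (0 + 1) a2 (by omega) (by omega) ha2.1 ha2.2).1
        (hbound (0 + 1) a2 (by omega) (by omega) ha2.1 ha2.2).2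
        (hbound (0 + 1) b2 (by omega) (by omega) hb2.1 hb2.2).1
        (hbound (0 + 1) b2 (by omega) (by omega) hb2.1 hb2.2).2
        ⟨(contains_pair 0 (0 + 1)).2, (contains_pair a2 b2).1⟩
        ⟨(contains_pair 0 (0 + 1)).2, (contains_pair a2 b2).2⟩ ?_
      intro u v hu hv
      rcases contains_pair_inv _ _ _ hu with rfl | rfl <;>
        rcases contains_pair_inv _ _ _ hv with rfl | rfl
      · exact Or.inr (Or.inr ⟨le_rfl, ha2.1, hA⟩)
      · exact Or.inr (Or.inr ⟨le_rfl, hb2.1, hB⟩)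
      · exact Or.inl ⟨rfl, rfl⟩
      · exact Or.inr (Or.inl ⟨rfl, rfl⟩)
    · simp only [if_neg h0]
      refine rebuild_eq matrix _ _ (a1 - 1) a2 (a1 - 1) b2 (by omega) ha2.1 (by omega) hb2.1
        (hbound (a1 - 1) a2 (by omega) (by omega) ha2.1 ha2.2).1
        (hbound (a1 - 1) a2 (by omega) (by omega) ha2.1 ha2.2).2
        (hbound (a1 - 1) b2 (by omega) (by omega) hb2.1 hb2.2).1
        (hbound (a1 - 1) b2 (by omega) (by omega) hb2.1 hb2.2).2
        ⟨(contains_pair a1 (a1 - 1)).2, (contains_pair a2 b2).1⟩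
        ⟨(contains_pair a1 (a1 - 1)).2, (contains_pair a2 b2).2⟩ ?_
      intro u v hu hv
      rcases contains_pair_inv _ _ _ hu with rfl | rfl <;>
        rcases contains_pair_inv _ _ _ hv with rfl | rfl
      · exact Or.inr (Or.inr ⟨ha1.1, ha2.1, hA⟩)
      · exact Or.inr (Or.inr ⟨hb1.1, hb2.1, hB⟩)
      · exact Or.inl ⟨rfl, rfl⟩
      · exact Or.inr (Or.inl ⟨rfl, rfl⟩)
  · by_cases hc : a2 = b2
    · -- same column: twin column a2+1 (column 0) or a2-1
      subst hc
      simp only [ne_eq, not_true_eq_false, if_false,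
        fun h => hr h, not_false_eq_true, if_true]
      by_cases h0 : a2 = 0
      · subst h0
        refine rebuild_eq matrix _ _ a1 (0 + 1) b1 (0 + 1) ha1.1 (by omega) hb1.1 (by omega)
          (hbound a1 (0 + 1) ha1.1 ha1.2 (by omega) (by omega)).1
          (hbound a1 (0 + 1) ha1.1 ha1.2 (by omega) (by omega)).2
          (hbound b1 (0 + 1) hb1.1 hb1.2 (by omega) (by omega)).1
          (hbound b1 (0 + 1) hb1.1 hb1.2 (by omega) (by omega)).2
          ⟨(contains_pair a1 b1).1, (contains_pair 0 (0 + 1)).2⟩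
          ⟨(contains_pair a1 b1).2, (contains_pair 0 (0 + 1)).2⟩ ?_
        intro u v hu hv
        rcases contains_pair_inv _ _ _ hu with rfl | rfl <;>
          rcases contains_pair_inv _ _ _ hv with rfl | rfl
        · exact Or.inr (Or.inr ⟨ha1.1, le_rfl, hA⟩)
        · exact Or.inl ⟨rfl, rfl⟩
        · exact Or.inr (Or.inr ⟨hb1.1, le_rfl, hB⟩)
        · exact Or.inr (Or.inl ⟨rfl, rfl⟩)
      · simp only [if_neg h0]
        refine rebuild_eq matrix _ _ a1 (a2 - 1) b1 (a2 - 1) ha1.1 (by omega) hb1.1 (by omega)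
          (hbound a1 (a2 - 1) ha1.1 ha1.2 (by omega) (by omega)).1
          (hbound a1 (a2 - 1) ha1.1 ha1.2 (by omega) (by omega)).2
          (hbound b1 (a2 - 1) hb1.1 hb1.2 (by omega) (by omega)).1
          (hbound b1 (a2 - 1) hb1.1 hb1.2 (by omega) (by omega)).2
          ⟨(contains_pair a1 b1).1, (contains_pair a2 (a2 - 1)).2⟩
          ⟨(contains_pair a1 b1).2, (contains_pair a2 (a2 - 1)).2⟩ ?_
        intro u v hu hv
        rcases contains_pair_inv _ _ _ hu with rfl | rfl <;>
          rcases contains_pair_inv _ _ _ hv with rfl | rfl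
        · exact Or.inr (Or.inr ⟨ha1.1, ha2.1, hA⟩)
        · exact Or.inl ⟨rfl, rfl⟩
        · exact Or.inr (Or.inr ⟨hb1.1, hb2.1, hB⟩)
        · exact Or.inr (Or.inl ⟨rfl, rfl⟩)
    · -- different row and column: the two opposite corners
      simp only [ne_eq, fun h => hr h, fun h => hc h,
        not_false_eq_true, if_true]
      refine rebuild_eq matrix _ _ a1 b2 b1 a2 ha1.1 hb2.1 hb1.1 ha2.1
        (hbound a1 b2 ha1.1 ha1.2 hb2.1 hb2.2).1
        (hbound a1 b2 ha1.1 ha1.2 hb2.1 hb2.2).2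
        (hbound b1 a2 hb1.1 hb1.2 ha2.1 ha2.2).1
        (hbound b1 a2 hb1.1 hb1.2 ha2.1 ha2.2).2
        ⟨(contains_pair a1 b1).1, (contains_pair a2 b2).2⟩
        ⟨(contains_pair a1 b1).2, (contains_pair a2 b2).1⟩ ?_
      intro u v hu hv
      rcases contains_pair_inv _ _ _ hu with rfl | rfl <;>
        rcases contains_pair_inv _ _ _ hv with rfl | rfl
      · exact Or.inr (Or.inr ⟨ha1.1, ha2.1, hA⟩)
      · exact Or.inl ⟨rfl, rfl⟩
      · exact Or.inr (Or.inl ⟨rfl, rfl⟩)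
      · exact Or.inr (Or.inr ⟨hb1.1, hb2.1, hB⟩)
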